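-- pv_equiv track=rewrite | github.com/b-lukaszuk/python_luzne_zadanka | book1/ch03/task8/main.py | are_n_same_elts_in_row
-- ===== SOURCE A (Python) =====
-- from typing import List
--
-- def are_n_same_elts_in_row(ints: List[int], n: int = 3) -> bool:
--     if len(ints) == 0:
--         return False
--     if n == 1:
--         return True
--     count: int = 1
--     prev_elt: int = ints[0]
--     for i in range(1, len(ints)):
--         if ints[i] == prev_elt:
--             count += 1
--             if count == n:
--                 return True
--         else:
--             count = 1
--             prev_elt = ints[i]
--     return False
-- ===== SOURCE B (Python) =====
-- from typing import List
--
-- def are_n_same_elts_in_row(ints: List[int], n: int = 3) -> bool: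
--     # a run of fewer than one element never matches
--     if n < 1:
--         return False
--     # brute force over windows: some length-n slice is n copies of its first element
--     return any(ints[i:i + n] == ints[i:i + 1] * n for i in range(len(ints) - n + 1))
-- ===== Notes on version B (the rewrite author's own statement) =====
-- stated objective: alternative
-- what changed: B brute-forces every length-n window with slice comparisons (any(ints[i:i+n] == ints[i:i+1]*n)) instead of A's single left-to-right pass that maintains a live run counter and previous-element state; it trades A's O(len) pass for an O(len*n) windowed scan with no mutable state.
import Mathlib
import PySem

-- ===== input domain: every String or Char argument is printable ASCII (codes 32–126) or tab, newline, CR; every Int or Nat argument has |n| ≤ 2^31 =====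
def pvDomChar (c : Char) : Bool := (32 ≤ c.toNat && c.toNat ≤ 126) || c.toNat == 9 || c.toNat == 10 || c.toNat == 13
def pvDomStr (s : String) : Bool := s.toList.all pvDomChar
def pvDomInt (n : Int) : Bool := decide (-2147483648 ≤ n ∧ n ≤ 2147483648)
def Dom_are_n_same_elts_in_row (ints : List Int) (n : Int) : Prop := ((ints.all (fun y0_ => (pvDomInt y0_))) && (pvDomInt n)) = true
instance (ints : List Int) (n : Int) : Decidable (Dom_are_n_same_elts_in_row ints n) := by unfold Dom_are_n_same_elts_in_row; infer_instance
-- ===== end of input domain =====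

-- B brute-forces every length-n window with a slice comparison instead of A's single pass
-- carrying a live run counter and previous-element state; return values proved equal on all inputs.


-- ===== PORT A =====
-- the for-loop over ints[1:] with state (count, prev_elt) and early return on count == n
def aLoop (n : Int) : List Int → Int → Int → Bool
  | [], _count, _prev => false
  | x :: rest, count, prev =>
    if x == prev then
      if count + 1 == n then true
      else aLoop n rest (count + 1) prev
    else aLoop n rest 1 x

def are_n_same_elts_in_row (ints : List Int) (n : Int) : Bool :=
  match ints with
  | [] => false                     -- if len(ints) == 0: return False
  | x :: rest =>
    if n == 1 then true             -- if n == 1: return True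
    else aLoop n rest 1 x           -- count = 1; prev_elt = ints[0]; for i in range(1, len(ints)): …

-- ===== PORT B =====
-- Python's 'list * n' (empty for n <= 0)
def pyListMul (xs : List Int) (n : Int) : List Int :=
  if n ≤ 0 then [] else (List.replicate n.toNat xs).flatten

def are_n_same_elts_in_row_alt (ints : List Int) (n : Int) : Bool :=
  if n < 1 then false               -- if n < 1: return False
  else                              -- any(ints[i:i+n] == ints[i:i+1] * n for i in range(len(ints) - n + 1))
    (PySem.List.pyRange 0 ((ints.length : Int) - n + 1) 1).any (fun i =>
      PySem.List.slice ints (some i) (some (i + n)) ==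
        pyListMul (PySem.List.slice ints (some i) (some (i + 1))) n)

-- ===== PRECONDITION & SPEC =====
def Spec_are_n_same_elts_in_row (ints : List Int) (n : Int) (out : Bool) : Prop := out = are_n_same_elts_in_row_alt ints n
instance (ints : List Int) (n : Int) (out : Bool) : Decidable (Spec_are_n_same_elts_in_row ints n out) := by unfold Spec_are_n_same_elts_in_row; infer_instance

-- ===== CLAIM (what is proved, stated in full; the proofs are below) =====
def Claim_equal_are_n_same_elts_in_row : Prop := ∀ (ints : List Int) (n : Int), Dom_are_n_same_elts_in_row ints n → Spec_are_n_same_elts_in_row ints n (are_n_same_elts_in_row ints n)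

-- ===== LEMMAS AND PROOFS =====

-- common characterisation both programs are reduced to (for n ≥ 1):
-- some window of n.toNat consecutive elements is constant
def HasWin (ints : List Int) (n : Int) : Prop :=
  ∃ (k : Nat) (a : Int), k + n.toNat ≤ ints.length ∧ ∀ x ∈ (ints.drop k).take n.toNat, x = a

theorem HasWin_shift (c : Nat) (prev y : Int) (r : List Int) (n : Int)
    (hy : y ≠ prev) (hc : c < n.toNat) :
    (HasWin (List.replicate c prev ++ y :: r) n ↔ HasWin (y :: r) n) := by
  constructor
  · rintro ⟨k, a, hk, hall⟩
    rw [List.length_append, List.length_replicate, List.length_cons] at hk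
    by_cases hkc : c ≤ k
    · refine ⟨k - c, a, by simp; omega, ?_⟩
      intro x hx
      apply hall
      rw [List.drop_append]
      simp only [List.length_replicate]
      rw [List.drop_replicate, show c - k = 0 from by omega, List.replicate_zero, List.nil_append]
      exact hx
    · exfalso
      rw [not_le] at hkc
      have hwin : (List.drop k (List.replicate c prev ++ y :: r)).take n.toNat
          = List.replicate (c - k) prev ++ y :: List.take (n.toNat - (c - k) - 1) r := by
        rw [List.drop_append]
        simp only [List.length_replicate]
        rw [List.drop_replicate, show k - c = 0 from by omega, List.drop_zero]
        rw [List.take_append]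
        rw [List.take_replicate, List.length_replicate, show min n.toNat (c - k) = c - k from by omega]
        congr 1
        rw [show n.toNat - (c - k) = (n.toNat - (c - k) - 1) + 1 from by omega]
        simp [List.take_succ_cons]
      have hprev : prev = a := by
        apply hall; rw [hwin]
        apply List.mem_append_left
        exact List.mem_replicate.mpr ⟨by omega, rfl⟩
      have hyy : y = a := by
        apply hall; rw [hwin]
        apply List.mem_append_right; simp
      exact hy (hyy.trans hprev.symm)
  · rintro ⟨k, a, hk, hall⟩
    refine ⟨c + k, a, by simp only [List.length_append, List.length_replicate]; omega, ?_⟩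
    intro x hx
    apply hall
    rwa [List.drop_append, List.length_replicate, show c + k - c = c + k - c from rfl,
      show c + k - c = k from by omega, List.drop_replicate, show c - (c + k) = 0 from by omega,
      List.replicate_zero, List.nil_append] at hx

theorem pyListMul_singleton (a : Int) (n : Int) (hn : 1 ≤ n) :
    pyListMul [a] n = List.replicate n.toNat a := by
  unfold pyListMul; rw [if_neg (by omega)]; exact List.flatten_replicate_singleton

theorem slice_win (ints : List Int) (i n : Int) (h0 : 0 ≤ i) (hn : 0 ≤ n) :
    PySem.List.slice ints (some i) (some (i + n)) = (ints.drop i.toNat).take n.toNat := by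
  rw [PySem.List.slice_toNat _ h0 (by omega)]; congr 1; omega

theorem alt_true_iff (ints : List Int) (n : Int) (hn : 1 ≤ n) :
    are_n_same_elts_in_row_alt ints n = true ↔ HasWin ints n := by
  unfold are_n_same_elts_in_row_alt
  rw [if_neg (by omega), List.any_eq_true]
  constructor
  · rintro ⟨i, hmem, hp⟩
    rw [PySem.List.mem_pyRange_one] at hmem
    obtain ⟨h0, hi⟩ := hmem
    rw [slice_win ints i n h0 (by omega), slice_win ints i 1 h0 (by omega)] at hp
    have hklen : i.toNat < ints.length := by omega
    have hne : ints.drop i.toNat ≠ [] := by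
      intro h; have := List.drop_eq_nil_iff.mp h; omega
    obtain ⟨a, t, ht⟩ := List.exists_cons_of_ne_nil hne
    rw [ht] at hp
    have h1 : (1 : Int).toNat = 1 := rfl
    rw [h1] at hp
    simp only [List.take_succ_cons, List.take_zero] at hp
    rw [pyListMul_singleton a n hn, beq_iff_eq] at hp
    refine ⟨i.toNat, a, by omega, ?_⟩
    rw [ht, hp]
    intro x hx
    exact List.eq_of_mem_replicate hx
  · rintro ⟨k, a, hkn, hall⟩
    have hnt : 1 ≤ n.toNat := by omega
    have hne : ints.drop k ≠ [] := by
      intro h; have := List.drop_eq_nil_iff.mp h; omega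
    obtain ⟨a', t, ht⟩ := List.exists_cons_of_ne_nil hne
    have ha' : a' = a := by
      apply hall; rw [ht]
      cases hnt' : n.toNat with
      | zero => omega
      | succ m => simp
    subst ha'
    refine ⟨(k : Int), ?_, ?_⟩
    · rw [PySem.List.mem_pyRange_one]; constructor
      · omega
      · omega
    · rw [slice_win ints k n (by omega) (by omega), slice_win ints k 1 (by omega) (by omega)]
      simp only [Int.toNat_natCast]
      rw [ht]
      have h1 : (1 : Int).toNat = 1 := rfl
      rw [h1]
      simp only [List.take_succ_cons, List.take_zero]
      rw [pyListMul_singleton a' n hn, beq_iff_eq]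
      apply List.eq_replicate_iff.mpr
      constructor
      · rw [List.length_take, ← ht, List.length_drop]; omega
      · intro x hx; apply hall; rw [ht]; exact hx

theorem aLoop_iff (n : Int) : ∀ (rest : List Int) (c : Nat) (prev : Int),
    1 ≤ c → ((c : Int) < n) →
    (aLoop n rest (c : Int) prev = true ↔ HasWin (List.replicate c prev ++ rest) n) := by
  intro rest
  induction rest with
  | nil =>
    intro c prev hc hcn
    simp only [aLoop, List.append_nil]
    constructor
    · intro h; exact absurd h (by simp)
    · rintro ⟨k, a, hk, -⟩
      rw [List.length_replicate] at hk
      exact absurd hk (by omega)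
  | cons y t ih =>
    intro c prev hc hcn
    by_cases hy : y = prev
    · subst hy
      have hrep2 : List.replicate c y ++ y :: t = List.replicate (c + 1) y ++ t := by
        rw [List.replicate_succ']
        simp
      by_cases heq : (c : Int) + 1 = n
      · refine iff_of_true (by simp [aLoop, heq]) ?_
        rw [hrep2]
        refine ⟨0, y, by simp only [List.length_append, List.length_replicate]; omega, ?_⟩
        intro x hx
        rw [List.drop_zero, List.take_append, List.take_replicate, List.length_replicate,
          show min n.toNat (c + 1) = n.toNat from by omega,
          show n.toNat - (c + 1) = 0 from by omega, List.take_zero, List.append_nil] at hx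
        exact List.eq_of_mem_replicate hx
      · rw [show aLoop n (y :: t) (c : Int) y = aLoop n t ((c : Int) + 1) y from by
          simp [aLoop, heq]]
        rw [show ((c : Int) + 1) = (((c + 1 : Nat) : Int)) from by push_cast; ring]
        rw [ih (c + 1) y (by omega) (by push_cast; omega), hrep2]
    · rw [show aLoop n (y :: t) (c : Int) prev = aLoop n t 1 y from by simp [aLoop, hy]]
      rw [show (1 : Int) = ((1 : Nat) : Int) from rfl]
      rw [ih 1 y le_rfl (by omega)]
      rw [HasWin_shift c prev y t n hy (by omega)]
      simp

theorem a_true_iff (ints : List Int) (n : Int) (hn : 1 ≤ n) :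
    are_n_same_elts_in_row ints n = true ↔ HasWin ints n := by
  match ints with
  | [] =>
    refine iff_of_false (by simp [are_n_same_elts_in_row]) ?_
    rintro ⟨k, a, hk, -⟩
    simp only [List.length_nil] at hk
    omega
  | x :: rest =>
    show (if (n == 1) = true then true else aLoop n rest 1 x) = true ↔ _
    by_cases hn1 : n = 1
    · subst hn1
      refine iff_of_true (by simp) ?_
      refine ⟨0, x, by simp, ?_⟩
      intro z hz
      simp only [Int.toNat_one, List.drop_zero, List.take_succ_cons, List.take_zero,
        List.mem_singleton] at hz
      exact hz
    · rw [if_neg (by simp [hn1])]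
      rw [show (1 : Int) = ((1 : Nat) : Int) from rfl]
      rw [aLoop_iff n rest 1 x le_rfl (by omega)]
      simp

-- ===== VERDICT (by name: the statement is the Claim_ definition above) =====
theorem are_n_same_elts_in_row_spec : Claim_equal_are_n_same_elts_in_row := by
  intro ints n _
  unfold Spec_are_n_same_elts_in_row
  by_cases hn : 1 ≤ n
  · rw [Bool.eq_iff_iff, a_true_iff ints n hn, alt_true_iff ints n hn]
  · -- n < 1: B's guard gives false; A's counter, always ≥ 1, never equals n
    have hb : are_n_same_elts_in_row_alt ints n = false := by
      unfold are_n_same_elts_in_row_alt; rw [if_pos (by omega)]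
    rw [hb]
    match ints with
    | [] => rfl
    | x :: rest =>
      have key : ∀ (r : List Int) (c p : Int), 1 ≤ c → aLoop n r c p = false := by
        intro r
        induction r with
        | nil => intro c p _; rfl
        | cons y t ih =>
          intro c p hc
          by_cases hy : y = p
          · have hne : ¬ (c + 1 = n) := by omega
            simp [aLoop, hy, hne, ih (c + 1) p (by omega)]
          · simp [aLoop, hy, ih 1 y le_rfl]
      show (if (n == 1) = true then true else aLoop n rest 1 x) = false
      rw [if_neg (by simp; omega), key rest 1 x le_rfl]
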